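-- pv_equiv track=rewrite | github.com/konstantinos61-0/CS50x | pset6/dna/dna.py | longest_match
-- ===== SOURCE A (Python) =====
-- def longest_match(sequence, subsequence):
--     """Returns length of longest run of subsequence in sequence."""
--
--     # Initialize variables
--     longest_run = 0
--     subsequence_length = len(subsequence)
--     sequence_length = len(sequence)
--
--     # Check each character in sequence for most consecutive runs of subsequence
--     for i in range(sequence_length):
--         # Check for a subsequence match in a "substring" (a subset of characters) within sequence
--         if sequence[i:i + subsequence_length] == subsequence:
--             # Initialize count of consecutive runs
--             count = 1
--             # If a match, move substring to next potential match in sequence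
--             # Continue moving substring and checking for matches until out of consecutive matches
--             while True:
--                 # Adjust substring start and end
--                 start = i + count * subsequence_length
--                 end = start + subsequence_length
--
--                 # If there is a match in the substring
--                 if sequence[start:end] == subsequence:
--                     count += 1
--
--                 # If there is no match in the substring
--                 else:
--                     break
--
--             # Update most consecutive matches found
--             longest_run = max(longest_run, count)
--
--     # After checking for runs at each character in seqeuence, return longest run found
--     return longest_run
-- ===== SOURCE B (Python) =====
-- def longest_match(sequence, subsequence):
--     """Returns length of longest run of subsequence in sequence."""
--     m = len(subsequence)
--     if m == 0:
--         return 0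
--     n = len(sequence)
--     # dp[i] = number of consecutive copies of subsequence starting at i
--     dp = [0] * (n + m)
--     best = 0
--     for i in range(n - 1, -1, -1):
--         if sequence[i:i + m] == subsequence:
--             v = 1 + dp[i + m]
--             dp[i] = v
--             if v > best:
--                 best = v
--     return best
-- ===== Notes on version B (the rewrite author's own statement) =====
-- stated objective: alternative
-- what changed: Replaces the per-position rescanning while-loop (which re-counts a whole run from every position inside it) with a single right-to-left dynamic-programming pass dp[i] = 1 + dp[i+m] on match, taking the max of dp.
-- outside the precondition, e.g. on longest_match('aa', ''): A does not finish within the time limit, B returns 0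
import Mathlib
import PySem

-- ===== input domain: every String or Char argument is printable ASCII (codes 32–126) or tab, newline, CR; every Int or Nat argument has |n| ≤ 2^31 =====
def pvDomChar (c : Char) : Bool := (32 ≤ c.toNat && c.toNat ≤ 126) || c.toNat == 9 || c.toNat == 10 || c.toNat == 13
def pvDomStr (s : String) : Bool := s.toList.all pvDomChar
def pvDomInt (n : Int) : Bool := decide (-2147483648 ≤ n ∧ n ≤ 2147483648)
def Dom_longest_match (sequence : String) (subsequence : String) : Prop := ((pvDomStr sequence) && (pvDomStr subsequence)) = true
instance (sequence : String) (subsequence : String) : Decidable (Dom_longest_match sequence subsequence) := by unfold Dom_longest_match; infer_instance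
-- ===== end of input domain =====

-- B replaces A's per-position rescanning while-loop with one right-to-left DP pass (dp[i] = 1 + dp[i+m] on a match); objective: alternative (avoids re-counting runs).

-- ===== PORT A =====
-- sequence[i:i+subsequence_length] == subsequence (loop indices are nonnegative)
def lmMatchA (cs sub : List Char) (i : Nat) : Bool :=
  PySem.List.slice cs (some (i : Int)) (some ((i : Int) + (sub.length : Int))) == sub

-- A's inner `while True` loop; fuel only makes it structural (n+1 iterations always
-- suffice when subsequence ≠ "", which Pre_ guarantees; Python loops forever otherwise)
def lmRunA (cs sub : List Char) (i : Nat) : Nat → Nat → Nat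
  | 0, count => count
  | fuel + 1, count =>
    -- start = i + count * subsequence_length; end = start + subsequence_length
    if lmMatchA cs sub (i + count * sub.length) then lmRunA cs sub i fuel (count + 1)
    else count

def longest_match (sequence : String) (subsequence : String) : Int :=
  let sub := subsequence.toList
  let cs := sequence.toList
  let n := cs.length
  ((List.range n).foldl (fun longest_run i =>
      if lmMatchA cs sub i then max longest_run (lmRunA cs sub i (n + 1) 1)
      else longest_run) 0 : Nat)

-- ===== PORT B =====
-- sequence[i:i+m] == subsequence
def lmMatchB (cs sub : List Char) (i : Nat) : Bool :=
  PySem.List.slice cs (some (i : Int)) (some ((i : Int) + (sub.length : Int))) == sub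

-- one step of B's loop body, state = (dp, best)
def lmStepB (cs sub : List Char) (st : List Nat × Nat) (i : Nat) : List Nat × Nat :=
  if lmMatchB cs sub i then
    -- v = 1 + dp[i + m]; dp[i] = v; best updated when v > best
    (st.1.set i (1 + st.1.getD (i + sub.length) 0),
     if 1 + st.1.getD (i + sub.length) 0 > st.2 then 1 + st.1.getD (i + sub.length) 0 else st.2)
  else st

def longest_match_alt (sequence : String) (subsequence : String) : Int :=
  let sub := subsequence.toList
  let m := sub.length
  if m = 0 then 0 else
  let cs := sequence.toList
  let n := cs.length
  -- range(n-1, -1, -1) enumerates the indices 0..n-1 in reverse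
  let st := (List.range n).reverse.foldl (lmStepB cs sub) (List.replicate (n + m) 0, 0)
  (st.2 : Int)

-- ===== PRECONDITION & SPEC =====
-- Pre_ excludes the inputs with an empty subsequence and a nonempty sequence, on which
-- Python A loops forever (sequence[i:i] == "" matches at every step, so the while never breaks).
def Pre_longest_match (sequence : String) (subsequence : String) : Prop :=
  subsequence ≠ "" ∨ sequence = ""
instance (sequence : String) (subsequence : String) : Decidable (Pre_longest_match sequence subsequence) := by
  unfold Pre_longest_match; infer_instance

def pvWitness_longest_match : String × String := ("actactgact", "act")

def Spec_longest_match (sequence : String) (subsequence : String) (out : Int) : Prop := out = longest_match_alt sequence subsequence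
instance (sequence : String) (subsequence : String) (out : Int) : Decidable (Spec_longest_match sequence subsequence out) := by unfold Spec_longest_match; infer_instance

-- ===== CLAIM (what is proved, stated in full; the proofs are below) =====
def Claim_equal_longest_match : Prop := ∀ (sequence : String) (subsequence : String), Dom_longest_match sequence subsequence → Pre_longest_match sequence subsequence → Spec_longest_match sequence subsequence (longest_match sequence subsequence)

-- ===== LEMMAS AND PROOFS =====

-- Boolean slice test unfolded to drop/take
theorem lmMatchA_eq (cs sub : List Char) (i : Nat) :
    lmMatchA cs sub i = ((cs.drop i).take sub.length == sub) := by
  unfold lmMatchA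
  rw [PySem.List.slice_natCast_add]

theorem lmMatchB_eq (cs sub : List Char) (i : Nat) :
    lmMatchB cs sub i = ((cs.drop i).take sub.length == sub) := by
  unfold lmMatchB
  rw [PySem.List.slice_natCast_add]

-- a match at i fits inside the sequence
theorem lmMatch_le (cs sub : List Char) (hm : 0 < sub.length) (i : Nat)
    (h : (cs.drop i).take sub.length = sub) : i + sub.length ≤ cs.length := by
  have hl := congrArg List.length h
  rw [List.length_take, List.length_drop] at hl
  omega

-- the greedy run-length from position i, with fuel
def lmChain (cs sub : List Char) : Nat → Nat → Nat
  | 0, _ => 0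
  | fuel + 1, i =>
    if (cs.drop i).take sub.length == sub then 1 + lmChain cs sub fuel (i + sub.length)
    else 0

theorem lmChain_stable (cs sub : List Char) (hm : 0 < sub.length) :
    ∀ f g i, cs.length < i + f → cs.length < i + g →
      lmChain cs sub f i = lmChain cs sub g i := by
  intro f
  induction f with
  | zero =>
    intro g i hf hg
    cases g with
    | zero => rfl
    | succ g =>
      simp only [lmChain]
      have : ¬ ((cs.drop i).take sub.length == sub) = true := by
        intro h
        have := lmMatch_le cs sub hm i (by simpa using h)
        omega
      simp [this]
  | succ f ih =>
    intro g i hf hg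
    cases g with
    | zero =>
      simp only [lmChain]
      have : ¬ ((cs.drop i).take sub.length == sub) = true := by
        intro h
        have := lmMatch_le cs sub hm i (by simpa using h)
        omega
      simp [this]
    | succ g =>
      simp only [lmChain]
      by_cases h : ((cs.drop i).take sub.length == sub) = true
      · have hle := lmMatch_le cs sub hm i (by simpa using h)
        rw [h, if_pos rfl, if_pos rfl, ih g (i + sub.length) (by omega) (by omega)]
      · simp [h]

-- canonical run-length: fuel cs.length + 1 always suffices
def lmC (cs sub : List Char) (i : Nat) : Nat := lmChain cs sub (cs.length + 1) i

theorem lmC_match (cs sub : List Char) (hm : 0 < sub.length) (i : Nat)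
    (h : ((cs.drop i).take sub.length == sub) = true) :
    lmC cs sub i = 1 + lmC cs sub (i + sub.length) := by
  unfold lmC
  have e : lmChain cs sub (cs.length + 1) i = 1 + lmChain cs sub cs.length (i + sub.length) := by
    simp only [lmChain]
    rw [if_pos h]
  rw [e, lmChain_stable cs sub hm cs.length (cs.length + 1) (i + sub.length) (by omega) (by omega)]

theorem lmC_nomatch (cs sub : List Char) (i : Nat)
    (h : ¬ ((cs.drop i).take sub.length == sub) = true) :
    lmC cs sub i = 0 := by
  unfold lmC
  simp only [lmChain]
  rw [if_neg h]

-- A's inner loop counts count + (chain from the current start)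
theorem lmRunA_eq_chain (cs sub : List Char) (i : Nat) :
    ∀ fuel count, lmRunA cs sub i fuel count = count + lmChain cs sub fuel (i + count * sub.length) := by
  intro fuel
  induction fuel with
  | zero => intro count; simp [lmRunA, lmChain]
  | succ fuel ih =>
    intro count
    simp only [lmRunA, lmChain, lmMatchA_eq]
    by_cases h : ((cs.drop (i + count * sub.length)).take sub.length == sub) = true
    · rw [if_pos h, if_pos h, ih (count + 1)]
      have : i + (count + 1) * sub.length = i + count * sub.length + sub.length := by ring
      rw [this]
      omega
    · simp [h]

theorem lmRunA_one (cs sub : List Char) (hm : 0 < sub.length) (i : Nat)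
    (h : ((cs.drop i).take sub.length == sub) = true) :
    lmRunA cs sub i (cs.length + 1) 1 = lmC cs sub i := by
  rw [lmRunA_eq_chain, lmC_match cs sub hm i h, one_mul]
  rfl

-- pulling a max out of a max-fold
theorem foldl_max_out (f : Nat → Nat) (l : List Nat) :
    ∀ a b, l.foldl (fun acc i => max acc (f i)) (max a b)
      = max (l.foldl (fun acc i => max acc (f i)) a) b := by
  induction l with
  | nil => intro a b; rfl
  | cons x l ih =>
    intro a b
    simp only [List.foldl_cons]
    rw [show max (max a b) (f x) = max (max a (f x)) b by omega]
    exact ih (max a (f x)) b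

-- A's fold computes the max of lmC over all positions
theorem foldA_eq (cs sub : List Char) (hm : 0 < sub.length) (k : Nat) :
    ∀ a, (List.range k).foldl (fun longest_run i =>
        if lmMatchA cs sub i then max longest_run (lmRunA cs sub i (cs.length + 1) 1)
        else longest_run) a
      = (List.range k).foldl (fun acc i => max acc (lmC cs sub i)) a := by
  induction k with
  | zero => intro a; rfl
  | succ k ih =>
    intro a
    rw [List.range_succ, List.foldl_append, List.foldl_append, ih]
    simp only [List.foldl_cons, List.foldl_nil, lmMatchA_eq]
    by_cases h : ((cs.drop k).take sub.length == sub) = true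
    · rw [if_pos h, lmRunA_one cs sub hm k h]
    · rw [if_neg h, lmC_nomatch cs sub k h]
      omega

-- B's invariant: folding over the indices k-1 .. 0 with dp correct from k upward
theorem foldB_inv (cs sub : List Char) (hm : 0 < sub.length) :
    ∀ (k : Nat) (dp : List Nat) (best : Nat),
      dp.length = cs.length + sub.length →
      (∀ j, k ≤ j → dp.getD j 0 = lmC cs sub j) →
      (∀ j, j < k → dp.getD j 0 = 0) →
      k ≤ cs.length →
      ((List.range k).reverse.foldl (lmStepB cs sub) (dp, best)).2
        = (List.range k).foldl (fun acc j => max acc (lmC cs sub j)) best := by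
  intro k
  induction k with
  | zero => intro dp best _ _ _ _; rfl
  | succ k ih =>
    intro dp best hlen hup hdown hk
    have hrev : (List.range (k + 1)).reverse = k :: (List.range k).reverse := by
      rw [List.range_succ, List.reverse_append]; rfl
    rw [hrev, List.foldl_cons]
    rw [List.range_succ, List.foldl_append]
    simp only [List.foldl_cons, List.foldl_nil]
    by_cases h : ((cs.drop k).take sub.length == sub) = true
    · have hstep : lmStepB cs sub (dp, best) k =
          (dp.set k (1 + dp.getD (k + sub.length) 0),
           if 1 + dp.getD (k + sub.length) 0 > best then 1 + dp.getD (k + sub.length) 0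
           else best) := by
        unfold lmStepB
        rw [lmMatchB_eq, if_pos h]
      have hv : 1 + dp.getD (k + sub.length) 0 = lmC cs sub k := by
        rw [hup (k + sub.length) (by omega), ← lmC_match cs sub hm k h]
      have hklt : k < dp.length := by omega
      have hlen' : (dp.set k (1 + dp.getD (k + sub.length) 0)).length = cs.length + sub.length := by
        simp [hlen]
      have hup' : ∀ j, k ≤ j →
          (dp.set k (1 + dp.getD (k + sub.length) 0)).getD j 0 = lmC cs sub j := by
        intro j hj
        rcases Nat.eq_or_lt_of_le hj with rfl | hj'
        · simp [List.getD_eq_getElem?_getD, hklt]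
          rw [← List.getD_eq_getElem?_getD]
          exact hv
        · have hne : k ≠ j := by omega
          simp only [List.getD_eq_getElem?_getD, List.getElem?_set, if_neg hne]
          exact hup j (by omega)
      have hdown' : ∀ j, j < k →
          (dp.set k (1 + dp.getD (k + sub.length) 0)).getD j 0 = 0 := by
        intro j hj
        have hne : k ≠ j := by omega
        simp only [List.getD_eq_getElem?_getD, List.getElem?_set, if_neg hne]
        exact hdown j (by omega)
      rw [hstep, ih _ _ hlen' hup' hdown' (by omega)]
      have hbest : (if 1 + dp.getD (k + sub.length) 0 > best then 1 + dp.getD (k + sub.length) 0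
          else best) = max best (lmC cs sub k) := by
        rw [hv]; split_ifs <;> omega
      rw [hbest, foldl_max_out]
    · have hstep : lmStepB cs sub (dp, best) k = (dp, best) := by
        unfold lmStepB
        rw [lmMatchB_eq, if_neg h]
      have hup' : ∀ j, k ≤ j → dp.getD j 0 = lmC cs sub j := by
        intro j hj
        rcases Nat.eq_or_lt_of_le hj with rfl | hj'
        · rw [lmC_nomatch cs sub k h]; exact hdown k (by omega)
        · exact hup j (by omega)
      rw [hstep, ih _ _ hlen hup' (fun j hj => hdown j (by omega)) (by omega)]
      rw [lmC_nomatch cs sub k h]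
      omega

-- initial dp (all zeros) satisfies the invariant at k = length
theorem foldB_eq (cs sub : List Char) (hm : 0 < sub.length) :
    ((List.range cs.length).reverse.foldl (lmStepB cs sub)
        (List.replicate (cs.length + sub.length) 0, 0)).2
      = (List.range cs.length).foldl (fun acc j => max acc (lmC cs sub j)) 0 := by
  apply foldB_inv cs sub hm cs.length _ 0 (by simp)
  · intro j hj
    have hz : (List.replicate (cs.length + sub.length) (0:Nat)).getD j 0 = 0 := by
      simp [List.getD_eq_getElem?_getD, List.getElem?_replicate]
      split <;> simp
    rw [hz]
    have : ¬ ((cs.drop j).take sub.length == sub) = true := by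
      intro h
      have := lmMatch_le cs sub hm j (by simpa using h)
      omega
    rw [lmC_nomatch cs sub j this]
  · intro j hj
    simp [List.getD_eq_getElem?_getD, List.getElem?_replicate]
    split <;> simp
  · omega

-- ===== VERDICT (by name: the statement is the Claim_ definition above) =====
theorem longest_match_spec : Claim_equal_longest_match := by
  intro sequence subsequence _ hpre
  unfold Spec_longest_match longest_match longest_match_alt
  by_cases hs : subsequence = ""
  · rcases hpre with h | h
    · exact absurd hs h
    · subst hs h; decide
  · have hm : 0 < subsequence.toList.length := by
      cases hT : subsequence.toList with
      | nil => exact absurd (String.toList_eq_nil_iff.mp hT) hs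
      | cons c t => simp

    simp only
    rw [if_neg (by omega)]
    rw [foldB_eq sequence.toList subsequence.toList hm]
    rw [foldA_eq sequence.toList subsequence.toList hm sequence.toList.length 0]
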